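-- pv_equiv track=rewrite | github.com/canfieldjuan/finetunelab.ai | lib/training/dataset_analyzer.py | check_role_alternation
-- ===== SOURCE A (Python) =====
-- from typing import Dict, List, Any, Tuple
--
-- def check_role_alternation(roles: List[str]) -> bool:
--     """Check if roles alternate properly (user/assistant)"""
--     # Skip system message if present
--     conversation_roles = [r for r in roles if r != "system"]
--
--     if not conversation_roles:
--         return False
--
--     # Should start with user
--     if conversation_roles[0] != "user":
--         return False
--
--     # Should alternate user/assistant
--     for i in range(len(conversation_roles) - 1):
--         current = conversation_roles[i]
--         next_role = conversation_roles[i + 1]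
--
--         if current == "user" and next_role != "assistant":
--             return False
--         if current == "assistant" and next_role != "user":
--             return False
--
--     return True
-- ===== SOURCE B (Python) =====
-- def check_role_alternation(roles):
--     """Check if roles alternate properly (user/assistant)"""
--     conversation_roles = [r for r in roles if r != "system"]
--     if not conversation_roles:
--         return False
--     return all(r == ("user" if i % 2 == 0 else "assistant")
--                for i, r in enumerate(conversation_roles))
-- ===== Notes on version B (the rewrite author's own statement) =====
-- stated objective: simpler
-- what changed: Replaces A's adjacent-pair relation loop (with an extra first-element guard) by a single index-parity match: element i of the filtered list must equal 'user' when i is even and 'assistant' when i is odd.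
import Mathlib
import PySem

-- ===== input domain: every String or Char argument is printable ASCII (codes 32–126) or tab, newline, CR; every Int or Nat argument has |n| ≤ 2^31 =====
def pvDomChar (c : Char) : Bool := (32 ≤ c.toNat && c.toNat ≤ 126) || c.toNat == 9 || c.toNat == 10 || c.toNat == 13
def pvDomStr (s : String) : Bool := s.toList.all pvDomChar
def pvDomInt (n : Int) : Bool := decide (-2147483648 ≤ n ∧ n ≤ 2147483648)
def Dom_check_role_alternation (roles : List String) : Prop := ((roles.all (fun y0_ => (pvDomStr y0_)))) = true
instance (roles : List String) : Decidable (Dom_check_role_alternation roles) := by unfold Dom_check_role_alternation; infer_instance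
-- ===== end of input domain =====

-- B changes A's adjacent-pair relation loop into an index-parity check (objective: simpler).

-- ===== PORT A =====
-- the `for i in range(len(cr)-1)` loop with its two early returns, as structural
-- recursion over adjacent pairs
def craLoop : List String → Bool
  | a :: b :: rest =>
      if a = "user" ∧ b ≠ "assistant" then false
      else if a = "assistant" ∧ b ≠ "user" then false
      else craLoop (b :: rest)
  | _ => true

def check_role_alternation (roles : List String) : Bool :=
  match roles.filter (fun r => r != "system") with
  | [] => false
  | x :: rest => if x ≠ "user" then false else craLoop (x :: rest)

-- ===== PORT B =====
-- expected role at index i (B's conditional expression)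
def expRole (i : Nat) : String := if i % 2 = 0 then "user" else "assistant"

-- B's `all(... for i, r in enumerate(...))`, carrying the index
def parLoop : Nat → List String → Bool
  | _, [] => true
  | i, r :: rest => (r == expRole i) && parLoop (i + 1) rest

def check_role_alternation_alt (roles : List String) : Bool :=
  match roles.filter (fun r => r != "system") with
  | [] => false
  | x :: rest => parLoop 0 (x :: rest)

-- ===== PRECONDITION & SPEC =====
def Spec_check_role_alternation (roles : List String) (out : Bool) : Prop := out = check_role_alternation_alt roles
instance (roles : List String) (out : Bool) : Decidable (Spec_check_role_alternation roles out) := by unfold Spec_check_role_alternation; infer_instance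

-- ===== CLAIM (what is proved, stated in full; the proofs are below) =====
def Claim_equal_check_role_alternation : Prop := ∀ (roles : List String), Dom_check_role_alternation roles → Spec_check_role_alternation roles (check_role_alternation roles)

-- ===== LEMMAS AND PROOFS =====

-- If the head matches the expected role for index i, A's pairwise loop and
-- B's parity loop agree on the whole list.
theorem craLoop_eq_parLoop (rest : List String) :
    ∀ (i : Nat) (x : String), x = expRole i →
      craLoop (x :: rest) = parLoop i (x :: rest) := by
  induction rest with
  | nil =>
      intro i x hx
      simp [craLoop, parLoop, hx]
  | cons y rest ih =>
      intro i x hx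
      by_cases hpar : i % 2 = 0
      · have hp1 : (i + 1) % 2 ≠ 0 := by omega
        have hx' : x = "user" := by simpa [expRole, hpar] using hx
        subst hx'
        by_cases hy : y = "assistant"
        · subst hy
          have hy' : "assistant" = expRole (i + 1) := by simp [expRole, hp1]
          have hstep : craLoop ("user" :: "assistant" :: rest)
              = craLoop ("assistant" :: rest) := by simp [craLoop]
          rw [hstep, ih (i + 1) _ hy']
          simp [parLoop, expRole, hpar, hp1]
        · simp [craLoop, parLoop, expRole, hpar, hp1, hy]
      · have hp1 : (i + 1) % 2 = 0 := by omega
        have hx' : x = "assistant" := by simpa [expRole, hpar] using hx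
        subst hx'
        by_cases hy : y = "user"
        · subst hy
          have hy' : "user" = expRole (i + 1) := by simp [expRole, hp1]
          have hstep : craLoop ("assistant" :: "user" :: rest)
              = craLoop ("user" :: rest) := by simp [craLoop]
          rw [hstep, ih (i + 1) _ hy']
          simp [parLoop, expRole, hpar, hp1]
        · simp [craLoop, parLoop, expRole, hpar, hp1, hy]

-- ===== VERDICT (by name: the statement is the Claim_ definition above) =====
theorem check_role_alternation_spec : Claim_equal_check_role_alternation := by
  intro roles _
  unfold Spec_check_role_alternation check_role_alternation check_role_alternation_alt
  cases h : roles.filter (fun r => r != "system") with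
  | nil => rfl
  | cons x rest =>
      by_cases hx : x = "user"
      · have hx' : x = expRole 0 := by simp [expRole, hx]
        subst hx
        simp only [ne_eq, not_true_eq_false, if_false]
        exact craLoop_eq_parLoop rest 0 "user" hx'
      · simp [hx, parLoop, expRole]
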